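-- pv_equiv track=rewrite | github.com/Rixmerz/jig | src/jig/hooks/graph_enforcer.py | parse_tools_blocked
-- ===== SOURCE A (Python) =====
-- def parse_tools_blocked(content):
--     """Extract node_id -> tools_blocked mapping from graph YAML.
--
--     Minimal parser (~25 lines). Only extracts 'id' and 'tools_blocked'
--     fields from the nodes section. Stops at 'edges:' section.
--     """
--     mapping = {}
--     node_id = None
--     collecting = False
--
--     for line in content.splitlines():
--         stripped = line.strip()
--
--         if not stripped or stripped.startswith("#"):
--             continue
--
--         # Stop at edges section — we only care about nodes
--         if stripped == "edges:" or stripped == "edges":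
--             break
--
--         # New node entry
--         if stripped.startswith("- id:"):
--             node_id = stripped.split(":", 1)[1].strip().strip('"').strip("'")
--             mapping[node_id] = []
--             collecting = False
--             continue
--
--         if node_id is None:
--             continue
--
--         # tools_blocked key (block list form)
--         if stripped.startswith("tools_blocked:"):
--             val = stripped.split(":", 1)[1].strip()
--             if not val:  # List follows on next lines
--                 collecting = True
--             continue
--
--         # List item under tools_blocked
--         if collecting and stripped.startswith("- "):
--             mapping[node_id].append(stripped[2:].strip().strip('"').strip("'"))
--             continue
--
--         # Any other key ends tools_blocked collection
--         if collecting and ":" in stripped: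
--             collecting = False
--
--     return mapping
-- ===== SOURCE B (Python) =====
-- def parse_tools_blocked(content):
--     """Extract node_id -> tools_blocked mapping from graph YAML.
--
--     Three phases: (1) strip/skip/truncate lines, (2) split into per-node
--     segments at '- id:' headers, (3) parse each segment independently.
--     """
--     # Phase 1: significant stripped lines up to the edges section.
--     sig = []
--     for line in content.splitlines():
--         s = line.strip()
--         if not s or s.startswith("#"):
--             continue
--         if s == "edges:" or s == "edges":
--             break
--         sig.append(s)
--
--     # Phase 2: skip the preamble before the first node header.
--     i = 0
--     n = len(sig)
--     while i < n and not sig[i].startswith("- id:"):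
--         i += 1
--
--     # Phase 3: one node segment at a time.
--     mapping = {}
--     while i < n:
--         node_id = sig[i].split(":", 1)[1].strip().strip('"').strip("'")
--         i += 1
--         items = []
--         collecting = False
--         while i < n and not sig[i].startswith("- id:"):
--             s = sig[i]
--             if s.startswith("tools_blocked:"):
--                 if not s.split(":", 1)[1].strip():
--                     collecting = True
--             elif collecting and s.startswith("- "):
--                 items.append(s[2:].strip().strip('"').strip("'"))
--             elif collecting and ":" in s:
--                 collecting = False
--             i += 1
--         mapping[node_id] = items
--     return mapping
-- ===== Notes on version B (the rewrite author's own statement) =====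
-- stated objective: alternative
-- what changed: A's single line scan with cross-line mutable state (current node id, collecting flag, dict mutated mid-scan) is re-decomposed into three phases: filter/strip lines up to the edges section, split them into per-node segments at '- id:' headers (dropping the preamble), then parse each segment independently and build the dict from the finished segments.
import Mathlib
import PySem

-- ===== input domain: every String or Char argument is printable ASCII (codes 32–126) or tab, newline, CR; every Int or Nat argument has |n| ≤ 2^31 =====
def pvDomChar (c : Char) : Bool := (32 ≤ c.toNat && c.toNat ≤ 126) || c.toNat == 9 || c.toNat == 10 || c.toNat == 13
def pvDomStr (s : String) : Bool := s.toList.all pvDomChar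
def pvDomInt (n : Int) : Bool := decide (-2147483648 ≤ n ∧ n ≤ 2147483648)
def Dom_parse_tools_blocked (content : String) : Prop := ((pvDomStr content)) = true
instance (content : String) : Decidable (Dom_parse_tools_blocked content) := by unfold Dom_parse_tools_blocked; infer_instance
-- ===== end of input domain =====

-- B re-decomposes A's single stateful line scan into three phases (filter/truncate, split into
-- per-node segments at '- id:' headers, parse each segment independently); same results, 'alternative' objective.


-- ===== PORT A =====
-- shared tiny helpers for the Python idioms both sources use verbatim:
-- s.split(":", 1)[1] (callers always have ':' in s, so the [] fallback is unreachable)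
def pvAfterColon (s : String) : String :=
  match PySem.Str.splitMax? s ":" 1 with
  | some (_ :: b :: _) => b
  | _ => ""
-- x.strip().strip('"').strip("'")
def pvClean (s : String) : String :=
  PySem.Str.stripChars (PySem.Str.stripChars (PySem.Str.strip s) "\"") "'"

-- A's for-loop with its break, as recursion over the lines with A's exact state.
def loopA : List String → PySem.Dict String (List String) → Option String → Bool →
    PySem.Dict String (List String)
  | [], m, _, _ => m
  | line :: rest, m, nodeId, collecting =>
    let stripped := PySem.Str.strip line
    if stripped = "" || PySem.Str.startswith stripped "#" then loopA rest m nodeId collecting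
    else if stripped = "edges:" || stripped = "edges" then m
    else if PySem.Str.startswith stripped "- id:" then
      let nid := pvClean (pvAfterColon stripped)
      loopA rest (m.insert nid []) (some nid) false
    else
      match nodeId with
      | none => loopA rest m none collecting
      | some nid =>
        if PySem.Str.startswith stripped "tools_blocked:" then
          if PySem.Str.strip (pvAfterColon stripped) = "" then loopA rest m (some nid) true
          else loopA rest m (some nid) collecting
        else if collecting && PySem.Str.startswith stripped "- " then
          loopA rest (m.modify nid [] (· ++ [pvClean (PySem.Str.slice stripped (some 2) none)]))
            (some nid) collecting
        else if collecting && PySem.Str.isIn ":" stripped then loopA rest m (some nid) false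
        else loopA rest m (some nid) collecting

def parse_tools_blocked (content : String) : List (String × List String) :=
  (loopA (PySem.Str.splitlines content) PySem.Dict.empty none false).items

-- ===== PORT B =====
def pvIsHeader (s : String) : Bool := PySem.Str.startswith s "- id:"

-- Phase 1: significant stripped lines up to the edges section.
def bSig : List String → List String
  | [] => []
  | line :: t =>
    let s := PySem.Str.strip line
    if s = "" || PySem.Str.startswith s "#" then bSig t
    else if s = "edges:" || s = "edges" then []
    else s :: bSig t

-- Phase 2: skip the preamble before the first node header.
def bSkip : List String → List String
  | [] => []
  | s :: t => if pvIsHeader s then s :: t else bSkip t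

-- Phase 3 inner while-loop: collect this segment's items, return them with the remaining lines.
def bBody : Bool → List String → List String → List String × List String
  | _, items, [] => (items, [])
  | collecting, items, s :: t =>
    if pvIsHeader s then (items, s :: t)
    else if PySem.Str.startswith s "tools_blocked:" then
      if PySem.Str.strip (pvAfterColon s) = "" then bBody true items t
      else bBody collecting items t
    else if collecting && PySem.Str.startswith s "- " then
      bBody collecting (items ++ [pvClean (PySem.Str.slice s (some 2) none)]) t
    else if collecting && PySem.Str.isIn ":" s then bBody false items t
    else bBody collecting items t

theorem bBody_len : ∀ (t : List String) (c : Bool) (acc : List String),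
    (bBody c acc t).2.length ≤ t.length := by
  intro t
  induction t with
  | nil => intro c acc; simp [bBody]
  | cons s t ih =>
    intro c acc
    simp only [bBody]
    split_ifs <;> simp <;> exact Nat.le_succ_of_le (ih _ _)

-- Phase 3 outer while-loop: one node segment at a time.
def bNodes : List String → PySem.Dict String (List String) → PySem.Dict String (List String)
  | [], m => m
  | s :: t, m =>
    let nid := pvClean (pvAfterColon s)
    let r := bBody false [] t
    bNodes r.2 (m.insert nid r.1)
termination_by ls _ => ls.length
decreasing_by
  exact Nat.lt_succ_of_le (bBody_len t false [])

def parse_tools_blocked_alt (content : String) : List (String × List String) :=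
  (bNodes (bSkip (bSig (PySem.Str.splitlines content))) PySem.Dict.empty).items

-- ===== PRECONDITION & SPEC =====
def Spec_parse_tools_blocked (content : String) (out : List (String × List String)) : Prop := out = parse_tools_blocked_alt content
instance (content : String) (out : List (String × List String)) : Decidable (Spec_parse_tools_blocked content out) := by unfold Spec_parse_tools_blocked; infer_instance

-- ===== CLAIM (what is proved, stated in full; the proofs are below) =====
def Claim_equal_parse_tools_blocked : Prop := ∀ (content : String), Dom_parse_tools_blocked content → Spec_parse_tools_blocked content (parse_tools_blocked content)

-- ===== LEMMAS AND PROOFS =====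

-- A's machine on already-stripped, already-filtered lines (proof intermediary).
def loopS : List String → PySem.Dict String (List String) → Option String → Bool →
    PySem.Dict String (List String)
  | [], m, _, _ => m
  | s :: rest, m, nodeId, collecting =>
    if pvIsHeader s then
      loopS rest (m.insert (pvClean (pvAfterColon s)) []) (some (pvClean (pvAfterColon s))) false
    else
      match nodeId with
      | none => loopS rest m none collecting
      | some nid =>
        if PySem.Str.startswith s "tools_blocked:" then
          if PySem.Str.strip (pvAfterColon s) = "" then loopS rest m (some nid) true
          else loopS rest m (some nid) collecting
        else if collecting && PySem.Str.startswith s "- " then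
          loopS rest (m.modify nid [] (· ++ [pvClean (PySem.Str.slice s (some 2) none)]))
            (some nid) collecting
        else if collecting && PySem.Str.isIn ":" s then loopS rest m (some nid) false
        else loopS rest m (some nid) collecting

theorem loopA_eq_loopS : ∀ (ls : List String) (m : PySem.Dict String (List String))
    (nid : Option String) (c : Bool), loopA ls m nid c = loopS (bSig ls) m nid c := by
  intro ls
  induction ls with
  | nil => intro m nid c; rfl
  | cons line t ih =>
    intro m nid c
    cases nid with
    | none =>
      simp only [loopA, bSig]
      by_cases h1 : (decide (PySem.Str.strip line = "") || PySem.Str.startswith (PySem.Str.strip line) "#") = true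
      · rw [if_pos h1, if_pos h1]; exact ih _ _ _
      rw [if_neg h1, if_neg h1]
      by_cases h2 : (decide (PySem.Str.strip line = "edges:") || decide (PySem.Str.strip line = "edges")) = true
      · rw [if_pos h2, if_pos h2]; rfl
      · rw [if_neg h2, if_neg h2]
        simp only [loopS, pvIsHeader]
        by_cases h3 : PySem.Str.startswith (PySem.Str.strip line) "- id:" = true
        · rw [if_pos h3, if_pos h3]; exact ih _ _ _
        · rw [if_neg h3, if_neg h3]; exact ih _ _ _
    | some nd =>
      simp only [loopA, bSig]
      by_cases h1 : (decide (PySem.Str.strip line = "") || PySem.Str.startswith (PySem.Str.strip line) "#") = true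
      · rw [if_pos h1, if_pos h1]; exact ih _ _ _
      rw [if_neg h1, if_neg h1]
      by_cases h2 : (decide (PySem.Str.strip line = "edges:") || decide (PySem.Str.strip line = "edges")) = true
      · rw [if_pos h2, if_pos h2]; rfl
      · rw [if_neg h2, if_neg h2]
        simp only [loopS, pvIsHeader]
        by_cases h3 : PySem.Str.startswith (PySem.Str.strip line) "- id:" = true
        · rw [if_pos h3, if_pos h3]; exact ih _ _ _
        · rw [if_neg h3, if_neg h3]
          split_ifs <;> exact ih _ _ _

theorem loopS_skip : ∀ (ls : List String) (m : PySem.Dict String (List String)) (c : Bool),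
    loopS ls m none c = loopS (bSkip ls) m none c := by
  intro ls
  induction ls with
  | nil => intro m c; rfl
  | cons s t ih =>
    intro m c
    by_cases h : pvIsHeader s = true
    · simp [bSkip, h]
    · simp only [bSkip, h, if_neg, Bool.false_eq_true, not_false_iff]
      rw [← ih m c]
      simp [loopS, h]

theorem insert_modify_append {d : PySem.Dict String (List String)} {k : String}
    {v x : List String} :
    (d.insert k v).modify k [] (· ++ x) = d.insert k (v ++ x) := by
  simp [PySem.Dict.modify, PySem.Dict.getD_insert_self, PySem.Dict.insert_insert_self]

theorem loopS_segment : ∀ (t : List String) (c : Bool) (acc : List String)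
    (m : PySem.Dict String (List String)) (nid : String),
    loopS t (m.insert nid acc) (some nid) c =
      loopS (bBody c acc t).2 (m.insert nid (bBody c acc t).1) (some nid) false := by
  intro t
  induction t with
  | nil => intro c acc m nid; simp [bBody, loopS]
  | cons s t ih =>
    intro c acc m nid
    by_cases h : pvIsHeader s = true
    · simp [loopS, bBody, h]
    · simp only [loopS, bBody, h, if_neg, Bool.false_eq_true, not_false_iff]
      split_ifs with h2 h3 h4 h5
      · exact ih _ _ _ _
      · exact ih _ _ _ _
      · rw [insert_modify_append]; exact ih _ _ _ _
      · exact ih _ _ _ _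
      · exact ih _ _ _ _

-- the remainder a segment parse leaves is empty or starts at the next header
theorem bBody_rest_shape : ∀ (t : List String) (c : Bool) (acc : List String),
    (bBody c acc t).2 = [] ∨
      ∃ s r, (bBody c acc t).2 = s :: r ∧ pvIsHeader s = true := by
  intro t
  induction t with
  | nil => intro c acc; left; rfl
  | cons s t ih =>
    intro c acc
    by_cases h : pvIsHeader s = true
    · right; exact ⟨s, t, by simp [bBody, h], h⟩
    · simp only [bBody, h, if_neg, Bool.false_eq_true, not_false_iff]
      split_ifs <;> exact ih _ _

theorem bSkip_shape : ∀ (ls : List String),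
    bSkip ls = [] ∨ ∃ s r, bSkip ls = s :: r ∧ pvIsHeader s = true := by
  intro ls
  induction ls with
  | nil => left; rfl
  | cons s t ih =>
    by_cases h : pvIsHeader s = true
    · right; exact ⟨s, t, by simp [bSkip, h], h⟩
    · simpa [bSkip, h] using ih

theorem loopS_eq_bNodes : ∀ (n : Nat) (ls : List String), ls.length ≤ n →
    (ls = [] ∨ ∃ s r, ls = s :: r ∧ pvIsHeader s = true) →
    ∀ (m : PySem.Dict String (List String)) (nid : Option String) (c : Bool),
    loopS ls m nid c = bNodes ls m := by
  intro n
  induction n with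
  | zero =>
    intro ls hlen _ m nid c
    have : ls = [] := List.eq_nil_of_length_eq_zero (Nat.le_zero.mp hlen)
    subst this; simp [loopS, bNodes]
  | succ n ih =>
    intro ls hlen hshape m nid c
    rcases hshape with h | ⟨s, r, rfl, hs⟩
    · subst h; simp [loopS, bNodes]
    · have h1 : loopS (s :: r) m nid c =
          loopS r (m.insert (pvClean (pvAfterColon s)) [])
            (some (pvClean (pvAfterColon s))) false := by
        simp [loopS, hs]
      have h2 : bNodes (s :: r) m =
          bNodes (bBody false [] r).2
            (m.insert (pvClean (pvAfterColon s)) (bBody false [] r).1) := by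
        simp [bNodes]
      rw [h1, loopS_segment r false [] m (pvClean (pvAfterColon s)), h2]
      have hlen2 : (bBody false [] r).2.length ≤ n :=
        Nat.le_of_lt_succ (Nat.lt_of_le_of_lt (bBody_len r false [])
          (Nat.lt_of_lt_of_le (Nat.lt_succ_self _) hlen))
      exact ih _ hlen2 (bBody_rest_shape r false []) _ _ _

-- ===== VERDICT (by name: the statement is the Claim_ definition above) =====
theorem parse_tools_blocked_spec : Claim_equal_parse_tools_blocked := by
  intro content _
  unfold Spec_parse_tools_blocked parse_tools_blocked parse_tools_blocked_alt
  rw [loopA_eq_loopS, loopS_skip]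
  rw [loopS_eq_bNodes (bSkip (bSig (PySem.Str.splitlines content))).length _ le_rfl
    (bSkip_shape _)]
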